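-- pv_equiv track=rewrite | github.com/adc21/snap-controller | controller/binary/mode_analysis.py | estimate_mdfloor_structure
-- ===== SOURCE A (Python) =====
-- from typing import List, Optional, Tuple
--
-- def estimate_mdfloor_structure(
--     num_modes: int, values_per_record: int
-- ) -> Tuple[int, List[str]]:
--     """MDFloor.xbn における 1 レコードあたりの DOF 配置を推定する。
--
--     SNAP は通常 6 DOF（Dx, Dy, Dz, Rx, Ry, Rz）×モード数の配列を持つが、
--     バージョンによって異なる場合がある。
--     ``num_modes × dof == values_per_record`` を満たす dof を探索する。
--
--     Parameters
--     ----------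
--     num_modes        : 固有モード数
--     values_per_record: 1 レコードあたりの値数（XbnReader.values_per_record）
--
--     Returns
--     -------
--     dof_per_mode : int
--         1 モードあたりの DOF 数（割り切れない場合は values_per_record を返す）
--     dof_labels   : list[str]
--         DOF 名リスト（len == dof_per_mode）
--     """
--     if num_modes <= 0 or values_per_record <= 0:
--         return 0, []
--
--     _DOF_LABELS: dict = {
--         6: ["Dx", "Dy", "Dz", "Rx", "Ry", "Rz"],
--         4: ["Dx", "Dy", "Rx", "Ry"],
--         3: ["Dx", "Dy", "Dz"],
--         2: ["Dx", "Dy"],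
--         1: ["Dx"],
--     }
--     for dof in (6, 4, 3, 2, 1):
--         if num_modes * dof == values_per_record:
--             labels = _DOF_LABELS.get(dof, [f"f{i}" for i in range(dof)])
--             return dof, labels
--
--     # 割り切れない場合: 全フィールドを raw として返す
--     return values_per_record, [f"f{i}" for i in range(values_per_record)]
-- ===== SOURCE B (Python) =====
-- def estimate_mdfloor_structure(num_modes, values_per_record):
--     if num_modes <= 0 or values_per_record <= 0:
--         return 0, []
--     _DOF_LABELS = {
--         6: ["Dx", "Dy", "Dz", "Rx", "Ry", "Rz"],
--         4: ["Dx", "Dy", "Rx", "Ry"],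
--         3: ["Dx", "Dy", "Dz"],
--         2: ["Dx", "Dy"],
--         1: ["Dx"],
--     }
--     if values_per_record % num_modes == 0:
--         dof = values_per_record // num_modes
--         if dof in _DOF_LABELS:
--             return dof, _DOF_LABELS[dof]
--     return values_per_record, [f"f{i}" for i in range(values_per_record)]
-- ===== Notes on version B (the rewrite author's own statement) =====
-- stated objective: simpler
-- what changed: Replaces A's linear scan over the five candidate DOFs (testing num_modes*dof == values_per_record for each) with a single divisibility test and one division: dof = values_per_record // num_modes when it divides evenly, then a dict membership test.
import Mathlib
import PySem

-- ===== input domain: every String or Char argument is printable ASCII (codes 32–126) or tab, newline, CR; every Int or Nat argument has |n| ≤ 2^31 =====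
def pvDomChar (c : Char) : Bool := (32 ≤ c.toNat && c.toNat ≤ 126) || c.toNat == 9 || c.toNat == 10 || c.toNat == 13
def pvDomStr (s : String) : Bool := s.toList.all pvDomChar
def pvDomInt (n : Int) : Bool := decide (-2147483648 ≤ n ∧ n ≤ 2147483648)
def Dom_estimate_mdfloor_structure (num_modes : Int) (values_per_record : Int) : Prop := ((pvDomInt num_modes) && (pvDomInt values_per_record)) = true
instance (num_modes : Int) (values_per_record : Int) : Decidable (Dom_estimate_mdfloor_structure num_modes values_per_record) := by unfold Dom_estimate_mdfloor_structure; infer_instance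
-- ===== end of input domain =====

-- B replaces A's scan over the five candidate DOFs with one divisibility test and one
-- division followed by a table membership test (objective: simpler).

-- ===== PORT A =====
-- [f"f{i}" for i in range(n)]  (identical comprehension appears in both Pythons)
def pvRawLabels (n : Int) : List String :=
  (PySem.List.pyRange 0 n 1).map (fun i => "f" ++ PySem.Int.toStr i)

-- the _DOF_LABELS dict literal (identical in both Pythons)
def pvDofDict : PySem.Dict Int (List String) :=
  PySem.Dict.ofList
    [(6, ["Dx", "Dy", "Dz", "Rx", "Ry", "Rz"]),
     (4, ["Dx", "Dy", "Rx", "Ry"]),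
     (3, ["Dx", "Dy", "Dz"]),
     (2, ["Dx", "Dy"]),
     (1, ["Dx"])]

-- the for-loop over (6, 4, 3, 2, 1); falling off the loop returns the raw fields
def pvLoopA (num_modes : Int) (values_per_record : Int) : List Int → Int × List String
  | [] => (values_per_record, pvRawLabels values_per_record)
  | dof :: rest =>
      if num_modes * dof = values_per_record then
        (dof, PySem.Dict.getD pvDofDict dof (pvRawLabels dof))
      else pvLoopA num_modes values_per_record rest

def estimate_mdfloor_structure (num_modes : Int) (values_per_record : Int) : Int × List String :=
  if num_modes ≤ 0 ∨ values_per_record ≤ 0 then (0, [])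
  else pvLoopA num_modes values_per_record [6, 4, 3, 2, 1]

-- ===== PORT B =====
-- 'dof in _DOF_LABELS' then '_DOF_LABELS[dof]': membership guarantees the key is present,
-- so the getD default [] is never returned.
def estimate_mdfloor_structure_alt (num_modes : Int) (values_per_record : Int) : Int × List String :=
  if num_modes ≤ 0 ∨ values_per_record ≤ 0 then (0, [])
  else if PySem.Int.mod values_per_record num_modes = 0 ∧
          (PySem.Dict.get? pvDofDict (PySem.Int.floordiv values_per_record num_modes)).isSome then
    (PySem.Int.floordiv values_per_record num_modes,
     PySem.Dict.getD pvDofDict (PySem.Int.floordiv values_per_record num_modes) [])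
  else (values_per_record, pvRawLabels values_per_record)

-- ===== PRECONDITION & SPEC =====
def Spec_estimate_mdfloor_structure (num_modes : Int) (values_per_record : Int) (out : Int × List String) : Prop := out = estimate_mdfloor_structure_alt num_modes values_per_record
instance (num_modes : Int) (values_per_record : Int) (out : Int × List String) : Decidable (Spec_estimate_mdfloor_structure num_modes values_per_record out) := by unfold Spec_estimate_mdfloor_structure; infer_instance

-- ===== CLAIM (what is proved, stated in full; the proofs are below) =====
def Claim_equal_estimate_mdfloor_structure : Prop := ∀ (num_modes : Int) (values_per_record : Int), Dom_estimate_mdfloor_structure num_modes values_per_record → Spec_estimate_mdfloor_structure num_modes values_per_record (estimate_mdfloor_structure num_modes values_per_record)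

-- ===== LEMMAS AND PROOFS =====

-- for positive num_modes, num_modes * d = v exactly when v is divisible and its quotient is d
theorem pv_hit (nm v d : Int) (hnm : 0 < nm) (h : nm * d = v) :
    PySem.Int.mod v nm = 0 ∧ PySem.Int.floordiv v nm = d := by
  subst h
  refine ⟨?_, ?_⟩
  · rw [PySem.Int.mod_eq_emod_of_pos hnm]; exact Int.mul_emod_right nm d
  · rw [PySem.Int.floordiv_eq_ediv_of_pos hnm]
    exact Int.mul_ediv_cancel_left d (by omega)

theorem pvDofDict_eq_mk : pvDofDict = PySem.Dict.mk
    [(6, ["Dx", "Dy", "Dz", "Rx", "Ry", "Rz"]),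
     (4, ["Dx", "Dy", "Rx", "Ry"]),
     (3, ["Dx", "Dy", "Dz"]),
     (2, ["Dx", "Dy"]),
     (1, ["Dx"])] := by rfl

-- ===== VERDICT (by name: the statement is the Claim_ definition above) =====
theorem estimate_mdfloor_structure_spec : Claim_equal_estimate_mdfloor_structure := by
  intro nm v _
  unfold Spec_estimate_mdfloor_structure estimate_mdfloor_structure estimate_mdfloor_structure_alt
  by_cases hg : nm ≤ 0 ∨ v ≤ 0
  · simp [hg]
  · simp only [hg, if_false]
    have hnm : 0 < nm := by omega
    have hback := PySem.Int.floordiv_mul_add_mod v nm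
    by_cases h6 : nm * 6 = v
    · obtain ⟨hm, hd⟩ := pv_hit nm v 6 hnm h6
      have s : (PySem.Dict.get? pvDofDict 6).isSome = true := rfl
      have gA : PySem.Dict.getD pvDofDict 6 (pvRawLabels 6) = ["Dx", "Dy", "Dz", "Rx", "Ry", "Rz"] := rfl
      have gB : PySem.Dict.getD pvDofDict 6 ([] : List String) = ["Dx", "Dy", "Dz", "Rx", "Ry", "Rz"] := rfl
      simp [pvLoopA, h6, hm, hd, s, gA, gB]
    · by_cases h4 : nm * 4 = v
      · obtain ⟨hm, hd⟩ := pv_hit nm v 4 hnm h4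
        have s : (PySem.Dict.get? pvDofDict 4).isSome = true := rfl
        have gA : PySem.Dict.getD pvDofDict 4 (pvRawLabels 4) = ["Dx", "Dy", "Rx", "Ry"] := rfl
        have gB : PySem.Dict.getD pvDofDict 4 ([] : List String) = ["Dx", "Dy", "Rx", "Ry"] := rfl
        simp [pvLoopA, h6, h4, hm, hd, s, gA, gB]
      · by_cases h3 : nm * 3 = v
        · obtain ⟨hm, hd⟩ := pv_hit nm v 3 hnm h3
          have s : (PySem.Dict.get? pvDofDict 3).isSome = true := rfl
          have gA : PySem.Dict.getD pvDofDict 3 (pvRawLabels 3) = ["Dx", "Dy", "Dz"] := rfl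
          have gB : PySem.Dict.getD pvDofDict 3 ([] : List String) = ["Dx", "Dy", "Dz"] := rfl
          simp [pvLoopA, h6, h4, h3, hm, hd, s, gA, gB]
        · by_cases h2 : nm * 2 = v
          · obtain ⟨hm, hd⟩ := pv_hit nm v 2 hnm h2
            have s : (PySem.Dict.get? pvDofDict 2).isSome = true := rfl
            have gA : PySem.Dict.getD pvDofDict 2 (pvRawLabels 2) = ["Dx", "Dy"] := rfl
            have gB : PySem.Dict.getD pvDofDict 2 ([] : List String) = ["Dx", "Dy"] := rfl
            simp [pvLoopA, h6, h4, h3, h2, hm, hd, s, gA, gB]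
          · by_cases h1 : nm * 1 = v
            · obtain ⟨hm, hd⟩ := pv_hit nm v 1 hnm h1
              have s : (PySem.Dict.get? pvDofDict 1).isSome = true := rfl
              have gA : PySem.Dict.getD pvDofDict 1 (pvRawLabels 1) = ["Dx"] := rfl
              have gB : PySem.Dict.getD pvDofDict 1 ([] : List String) = ["Dx"] := rfl
              simp [pvLoopA, h6, h4, h3, h2, h1, hm, hd, s, gA, gB]
            · have hcond : ¬ (PySem.Int.mod v nm = 0 ∧
                  (PySem.Dict.get? pvDofDict (PySem.Int.floordiv v nm)).isSome = true) := by
                rintro ⟨hm, hmem⟩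
                rw [hm] at hback
                rw [pvDofDict_eq_mk] at hmem
                simp only [PySem.Dict.get?_mk_cons] at hmem
                split_ifs at hmem with e6 e4 e3 e2 e1
                · rw [← (beq_iff_eq.mp e6)] at hback; omega
                · rw [← (beq_iff_eq.mp e4)] at hback; omega
                · rw [← (beq_iff_eq.mp e3)] at hback; omega
                · rw [← (beq_iff_eq.mp e2)] at hback; omega
                · rw [← (beq_iff_eq.mp e1)] at hback; omega
                · simp [PySem.Dict.get?] at hmem
              have h1' : nm ≠ v := by omega
              simp [pvLoopA, h6, h4, h3, h2, h1', hcond]
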